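-- pv_equiv track=rewrite | github.com/takasan1234/University_Resources | 情報通信工学専門実験 A/EXP4/QuineMcCluskey_debug.py | combine_terms
-- ===== SOURCE A (Python) =====
-- def combine_terms(a, b):
--     """2つのビット列を比較し、1ビットのみ異なる場合に結合（'-'を用いる）"""
--     diff = 0
--     combined = []
--     for bit_a, bit_b in zip(a, b):
--         if bit_a != bit_b:
--             diff += 1
--             combined.append('-')
--         else:
--             combined.append(bit_a)
--     return ''.join(combined) if diff == 1 else None
-- ===== SOURCE B (Python) =====
-- def combine_terms(a, b):
--     """Find-then-construct: locate the differing positions first, only build a string when exactly one."""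
--     pairs = list(zip(a, b))
--     diffs = [i for i, (x, y) in enumerate(pairs) if x != y]
--     if len(diffs) != 1:
--         return None
--     i = diffs[0]
--     return ''.join('-' if j == i else x for j, (x, y) in enumerate(pairs))
-- ===== Notes on version B (the rewrite author's own statement) =====
-- stated objective: alternative
-- what changed: Two-phase find-then-construct: first collect the indices where the zipped characters differ, then build the combined string only when exactly one index was found, instead of accumulating the combined list while counting differences in a single pass.
import Mathlib
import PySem

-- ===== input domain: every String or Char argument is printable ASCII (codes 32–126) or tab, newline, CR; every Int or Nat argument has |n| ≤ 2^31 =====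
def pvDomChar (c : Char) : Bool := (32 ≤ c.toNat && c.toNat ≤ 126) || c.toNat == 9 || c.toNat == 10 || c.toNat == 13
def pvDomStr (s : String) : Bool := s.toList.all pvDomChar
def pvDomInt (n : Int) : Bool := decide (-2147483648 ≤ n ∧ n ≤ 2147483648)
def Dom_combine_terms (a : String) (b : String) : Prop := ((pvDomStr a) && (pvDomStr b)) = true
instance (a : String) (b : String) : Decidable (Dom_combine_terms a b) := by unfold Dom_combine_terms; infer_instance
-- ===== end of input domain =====

-- B re-implements combine_terms in two phases (collect the differing indices, then construct); same return value, stated and proved below.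


-- ===== PORT A =====
-- single pass: count differences while accumulating the combined characters
def combine_terms (a : String) (b : String) : Option String :=
  let res := (a.toList.zip b.toList).foldl
    (fun (st : Nat × List Char) p =>
      if p.1 ≠ p.2 then (st.1 + 1, st.2 ++ ['-']) else (st.1, st.2 ++ [p.1]))
    (0, [])
  if res.1 = 1 then some (String.mk res.2) else none

-- ===== PORT B =====
-- phase 1: indices where the zipped characters differ; phase 2: construct only if exactly one
def combine_terms_alt (a : String) (b : String) : Option String :=
  let pairs := a.toList.zip b.toList
  let diffs := ((PySem.List.enumerate pairs 0).filter (fun p => p.2.1 ≠ p.2.2)).map (·.1)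
  if diffs.length ≠ 1 then none
  else
    let i := diffs[0]!
    some (String.mk ((PySem.List.enumerate pairs 0).map (fun q => if q.1 = i then '-' else q.2.1)))

-- ===== PRECONDITION & SPEC =====
def Spec_combine_terms (a : String) (b : String) (out : Option String) : Prop := out = combine_terms_alt a b
instance (a : String) (b : String) (out : Option String) : Decidable (Spec_combine_terms a b out) := by unfold Spec_combine_terms; infer_instance

-- ===== CLAIM (what is proved, stated in full; the proofs are below) =====
def Claim_equal_combine_terms : Prop := ∀ (a : String) (b : String), Dom_combine_terms a b → Spec_combine_terms a b (combine_terms a b)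

-- ===== LEMMAS AND PROOFS =====

-- the per-pair character A emits
def pvF (p : Char × Char) : Char := if p.1 ≠ p.2 then '-' else p.1

-- the list of differing indices B collects (enumerate starting at k)
def pvDIdx (l : List (Char × Char)) (k : Int) : List Int :=
  ((PySem.List.enumerate l k).filter (fun p => p.2.1 ≠ p.2.2)).map (·.1)

lemma pvDIdx_cons (h : Char × Char) (t : List (Char × Char)) (k : Int) :
    pvDIdx (h :: t) k = (if h.1 ≠ h.2 then [k] else []) ++ pvDIdx t (k + 1) := by
  by_cases hxy : h.1 = h.2 <;>
    simp [pvDIdx, PySem.List.enumerate_cons, hxy]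

lemma pvMap_cons (h : Char × Char) (t : List (Char × Char)) (k i : Int) :
    (PySem.List.enumerate (h :: t) k).map (fun q => if q.1 = i then '-' else q.2.1)
      = (if k = i then '-' else h.1) :: (PySem.List.enumerate t (k + 1)).map (fun q => if q.1 = i then '-' else q.2.1) := by
  simp [PySem.List.enumerate_cons]

-- A's loop characterised: count of differing pairs, plus the map of pvF
lemma pvLoopA (l : List (Char × Char)) : ∀ (d : Nat) (acc : List Char),
    l.foldl (fun (st : Nat × List Char) p =>
      if p.1 ≠ p.2 then (st.1 + 1, st.2 ++ ['-']) else (st.1, st.2 ++ [p.1])) (d, acc)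
    = (d + (l.filter (fun p => p.1 ≠ p.2)).length, acc ++ l.map pvF) := by
  induction l with
  | nil => simp
  | cons h t ih =>
    intro d acc
    by_cases hxy : h.1 = h.2
    · rw [List.foldl_cons, if_neg (by simp [hxy]), ih]
      simp [hxy, pvF]
    · rw [List.foldl_cons, if_pos hxy, ih]
      simp [hxy, pvF]
      omega

-- every index collected from enumerate starting at k is ≥ k
lemma pvDIdx_ge (l : List (Char × Char)) : ∀ (k j : Int), j ∈ pvDIdx l k → k ≤ j := by
  induction l with
  | nil => intro k j hj; simp [pvDIdx, PySem.List.enumerate_nil] at hj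
  | cons h t ih =>
    intro k j hj
    rw [pvDIdx_cons] at hj
    by_cases hxy : h.1 = h.2
    · rw [if_neg (by simp [hxy])] at hj
      have := ih (k + 1) j (by simpa using hj)
      omega
    · rw [if_pos hxy] at hj
      rcases List.mem_append.mp hj with hj | hj
      · simp at hj; omega
      · have := ih (k + 1) j hj
        omega

-- no differing index in the enumerated region and i below it: construction agrees with pvF
lemma pvBuild_none (l : List (Char × Char)) : ∀ (k i : Int), i < k → pvDIdx l k = [] →
    (PySem.List.enumerate l k).map (fun q => if q.1 = i then '-' else q.2.1) = l.map pvF := by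
  induction l with
  | nil => intro k i _ _; simp [PySem.List.enumerate_nil]
  | cons h t ih =>
    intro k i hik hD
    rw [pvDIdx_cons] at hD
    by_cases hxy : h.1 = h.2
    · rw [if_neg (by simp [hxy])] at hD
      rw [pvMap_cons, if_neg (by omega), ih (k + 1) i (by omega) (by simpa using hD)]
      simp [pvF, hxy]
    · rw [if_pos hxy] at hD
      simp at hD
-- exactly one differing index i: construction equals the pvF map
lemma pvBuild_one (l : List (Char × Char)) : ∀ (k i : Int), pvDIdx l k = [i] →
    (PySem.List.enumerate l k).map (fun q => if q.1 = i then '-' else q.2.1) = l.map pvF := by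
  induction l with
  | nil => intro k i h; simp [pvDIdx, PySem.List.enumerate_nil] at h
  | cons h t ih =>
    intro k i hD
    rw [pvDIdx_cons] at hD
    by_cases hxy : h.1 = h.2
    · rw [if_neg (by simp [hxy])] at hD
      simp only [List.nil_append] at hD
      have hki : k ≠ i := by
        intro he; subst he
        have := pvDIdx_ge t (k + 1) k (by rw [hD]; simp)
        omega
      rw [pvMap_cons, if_neg hki, ih (k + 1) i hD]
      simp [pvF, hxy]
    · rw [if_pos hxy] at hD
      simp only [List.cons_append, List.nil_append, List.cons.injEq] at hD
      obtain ⟨rfl, hrest⟩ := hD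
      rw [pvMap_cons, if_pos rfl, pvBuild_none t (k + 1) k (by omega) hrest]
      simp [pvF, hxy]

-- lengths agree: number of differing pairs = number of collected indices
lemma pvLen (l : List (Char × Char)) : ∀ (k : Int),
    (pvDIdx l k).length = (l.filter (fun p => p.1 ≠ p.2)).length := by
  induction l with
  | nil => intro k; simp [pvDIdx, PySem.List.enumerate_nil]
  | cons h t ih =>
    intro k
    rw [pvDIdx_cons]
    by_cases hxy : h.1 = h.2 <;> simp [hxy, ih (k + 1)]

-- ===== VERDICT (by name: the statement is the Claim_ definition above) =====
theorem combine_terms_spec : Claim_equal_combine_terms := by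
  intro a b _
  unfold Spec_combine_terms
  set l := a.toList.zip b.toList with hl
  have hA : combine_terms a b
      = (if (l.filter (fun p => p.1 ≠ p.2)).length = 1 then some (String.mk (l.map pvF)) else none) := by
    unfold combine_terms
    rw [← hl, pvLoopA]
    simp
  have hB : combine_terms_alt a b
      = (if (pvDIdx l 0).length ≠ 1 then none
         else some (String.mk ((PySem.List.enumerate l 0).map
           (fun q => if q.1 = (pvDIdx l 0)[0]! then '-' else q.2.1)))) := rfl
  rw [hA, hB]
  have hlen := pvLen l 0
  by_cases hd1 : (pvDIdx l 0).length = 1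
  · obtain ⟨i, hi⟩ := List.length_eq_one_iff.mp hd1
    rw [if_pos (by omega), if_neg (by omega), hi]
    simp only [List.getElem!_cons_zero]
    rw [pvBuild_one l 0 i hi]
  · rw [if_neg (by omega), if_pos (by omega)]
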